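-- pv_equiv track=rewrite | github.com/officialinspire/THE-HARDIGAN-BOYS-vs-THE-MEXICAN-DRUG-CARTEL | scripts/fix_sprite_transparency.py | edge_coordinates
-- ===== SOURCE A (Python) =====
-- EDGE_BAND = 3
--
-- def edge_coordinates(width: int, height: int, band: int = EDGE_BAND) -> set[tuple[int, int]]:
--     coords: set[tuple[int, int]] = set()
--     max_x = width - 1
--     max_y = height - 1
--     for y in range(min(band, height)):
--         for x in range(width):
--             coords.add((x, y))
--     for y in range(max(0, height - band), height):
--         for x in range(width):
--             coords.add((x, y))
--     for x in range(min(band, width)):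
--         for y in range(height):
--             coords.add((x, y))
--     for x in range(max(0, width - band), width):
--         for y in range(height):
--             coords.add((x, y))
--     return coords
-- ===== SOURCE B (Python) =====
-- EDGE_BAND = 3
--
-- def edge_coordinates(width: int, height: int, band: int = EDGE_BAND) -> set[tuple[int, int]]:
--     # Clamp the band to the rectangle, then enumerate the four DISJOINT pieces
--     # of the border directly: full top rows, full bottom rows, and the left /
--     # right side segments of the middle rows.  No overlap, so no dedup needed.
--     top = min(band, height)
--     bottom = max(top, height - band)
--     left = min(band, width)
--     right = max(left, width - band)
--     border_rows = list(range(top)) + list(range(bottom, height))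
--     cells = [(x, y) for y in border_rows for x in range(width)]
--     cells += [(x, y)
--               for x in list(range(left)) + list(range(right, width))
--               for y in range(top, bottom)]
--     return set(cells)
-- ===== Notes on version B (the rewrite author's own statement) =====
-- stated objective: simpler
-- what changed: A adds four overlapping boundary stripes into a set, relying on set deduplication; B clamps the band once and enumerates the four pairwise-disjoint border pieces (full top rows, full bottom rows, left/right segments of the middle rows) as duplicate-free comprehensions, so no element is ever visited or deduplicated twice.
import Mathlib
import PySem

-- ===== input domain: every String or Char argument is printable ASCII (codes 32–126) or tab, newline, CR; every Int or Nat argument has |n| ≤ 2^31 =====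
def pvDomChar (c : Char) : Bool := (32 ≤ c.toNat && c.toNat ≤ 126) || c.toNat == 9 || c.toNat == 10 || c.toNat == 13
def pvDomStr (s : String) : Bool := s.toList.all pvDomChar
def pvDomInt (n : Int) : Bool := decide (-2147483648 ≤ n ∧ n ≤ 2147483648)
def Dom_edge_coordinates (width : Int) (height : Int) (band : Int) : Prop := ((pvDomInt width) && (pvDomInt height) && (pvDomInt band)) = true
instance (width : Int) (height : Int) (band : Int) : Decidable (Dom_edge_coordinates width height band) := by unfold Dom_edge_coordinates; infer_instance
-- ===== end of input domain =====

-- B replaces A's four overlapping stripes poured into a deduplicating set by a direct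
-- enumeration of the four pairwise-disjoint border pieces (simpler: no cell is visited twice).

-- ===== PORT A =====
def edge_coordinates (width : Int) (height : Int) (band : Int) : List (Int × Int) :=
  let coords : PySem.Set (Int × Int) := PySem.Set.empty
  let _max_x := width - 1
  let _max_y := height - 1
  let coords := (PySem.List.pyRange 0 (min band height) 1).foldl
    (fun s y => (PySem.List.pyRange 0 width 1).foldl (fun s x => PySem.Set.add s (x, y)) s) coords
  let coords := (PySem.List.pyRange (max 0 (height - band)) height 1).foldl
    (fun s y => (PySem.List.pyRange 0 width 1).foldl (fun s x => PySem.Set.add s (x, y)) s) coords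
  let coords := (PySem.List.pyRange 0 (min band width) 1).foldl
    (fun s x => (PySem.List.pyRange 0 height 1).foldl (fun s y => PySem.Set.add s (x, y)) s) coords
  let coords := (PySem.List.pyRange (max 0 (width - band)) width 1).foldl
    (fun s x => (PySem.List.pyRange 0 height 1).foldl (fun s y => PySem.Set.add s (x, y)) s) coords
  coords

-- ===== PORT B =====
def edge_coordinates_alt (width : Int) (height : Int) (band : Int) : List (Int × Int) :=
  let top := min band height
  let bottom := max top (height - band)
  let left := min band width
  let right := max left (width - band)
  let borderRows := PySem.List.pyRange 0 top 1 ++ PySem.List.pyRange bottom height 1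
  let cells := borderRows.flatMap (fun y => (PySem.List.pyRange 0 width 1).map (fun x => (x, y)))
  let cells := cells ++ (PySem.List.pyRange 0 left 1 ++ PySem.List.pyRange right width 1).flatMap
      (fun x => (PySem.List.pyRange top bottom 1).map (fun y => (x, y)))
  PySem.Set.ofList cells

-- ===== PRECONDITION & SPEC =====
def Spec_edge_coordinates (width : Int) (height : Int) (band : Int) (out : List (Int × Int)) : Prop := out = edge_coordinates_alt width height band
instance (width : Int) (height : Int) (band : Int) (out : List (Int × Int)) : Decidable (Spec_edge_coordinates width height band out) := by unfold Spec_edge_coordinates; infer_instance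

-- ===== CLAIM (what is proved, stated in full; the proofs are below) =====
def Claim_equal_edge_coordinates : Prop := ∀ (width : Int) (height : Int) (band : Int), Dom_edge_coordinates width height band → Spec_edge_coordinates width height band (edge_coordinates width height band)

-- ===== LEMMAS AND PROOFS =====

def pvRow (w : Int) (y : Int) : List (Int × Int) := (PySem.List.pyRange 0 w 1).map (fun x => (x, y))
def pvColSeg (t bo : Int) (x : Int) : List (Int × Int) := (PySem.List.pyRange t bo 1).map (fun y => (x, y))

theorem mem_flat_row (a c w : Int) (p : Int × Int) :
    p ∈ (PySem.List.pyRange a c 1).flatMap (pvRow w) ↔ 0 ≤ p.1 ∧ p.1 < w ∧ a ≤ p.2 ∧ p.2 < c := by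
  obtain ⟨px, py⟩ := p
  simp only [List.mem_flatMap, pvRow, List.mem_map, PySem.List.mem_pyRange_one, Prod.mk.injEq]
  constructor
  · rintro ⟨y, hy, x, hx, rfl, rfl⟩; exact ⟨hx.1, hx.2, hy.1, hy.2⟩
  · rintro ⟨h1, h2, h3, h4⟩; exact ⟨py, ⟨h3, h4⟩, px, ⟨h1, h2⟩, rfl, rfl⟩

theorem mem_flat_col (a c t bo : Int) (p : Int × Int) :
    p ∈ (PySem.List.pyRange a c 1).flatMap (pvColSeg t bo) ↔ a ≤ p.1 ∧ p.1 < c ∧ t ≤ p.2 ∧ p.2 < bo := by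
  obtain ⟨px, py⟩ := p
  simp only [List.mem_flatMap, pvColSeg, List.mem_map, PySem.List.mem_pyRange_one, Prod.mk.injEq]
  constructor
  · rintro ⟨x, hx, y, hy, rfl, rfl⟩; exact ⟨hx.1, hx.2, hy.1, hy.2⟩
  · rintro ⟨h1, h2, h3, h4⟩; exact ⟨px, ⟨h1, h2⟩, py, ⟨h3, h4⟩, rfl, rfl⟩

theorem nodup_fm (ys : List Int) (g : Int → List (Int × Int)) (key : (Int × Int) → Int)
    (h1 : ys.Nodup) (h2 : ∀ y ∈ ys, (g y).Nodup) (h3 : ∀ y ∈ ys, ∀ p ∈ g y, key p = y) :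
    (ys.flatMap g).Nodup := by
  induction ys with
  | nil => simp
  | cons y ys ih =>
    simp only [List.flatMap_cons]
    apply List.Nodup.append
    · exact h2 y (by simp)
    · exact ih h1.of_cons (fun y hy => h2 y (by simp [hy])) (fun y hy => h3 y (by simp [hy]))
    · intro p hp hp2
      simp only [List.mem_flatMap] at hp2
      obtain ⟨y', hy', hpy'⟩ := hp2
      have e1 := h3 y (by simp) p hp
      have e2 := h3 y' (by simp [hy']) p hpy'
      have : y' = y := by omega
      subst this
      rcases List.nodup_cons.mp h1 with ⟨hny, _⟩
      exact hny hy'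

theorem nodup_flat_row (a c w : Int) : ((PySem.List.pyRange a c 1).flatMap (pvRow w)).Nodup := by
  refine nodup_fm _ _ Prod.snd (PySem.List.nodup_pyRange_one _ _) (fun y _ => ?_) (fun y _ p hp => ?_)
  · exact (PySem.List.nodup_pyRange_one _ _).map (fun a b h => by simpa using congrArg Prod.fst h)
  · simp only [pvRow, List.mem_map] at hp; obtain ⟨x, _, rfl⟩ := hp; rfl

theorem nodup_flat_col (a c t bo : Int) : ((PySem.List.pyRange a c 1).flatMap (pvColSeg t bo)).Nodup := by
  refine nodup_fm _ _ Prod.fst (PySem.List.nodup_pyRange_one _ _) (fun x _ => ?_) (fun x _ p hp => ?_)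
  · exact (PySem.List.nodup_pyRange_one _ _).map (fun a b h => by simpa using congrArg Prod.snd h)
  · simp only [pvColSeg, List.mem_map] at hp; obtain ⟨y, _, rfl⟩ := hp; rfl

theorem upd_sub (s : PySem.Set (Int × Int)) (l : List (Int × Int)) (h : ∀ x ∈ l, x ∈ s) :
    PySem.Set.update s l = s := by
  rw [PySem.Set.update_eq_append_filter]
  have : (PySem.Set.ofList l).filter (fun y => !(PySem.Set.contains s y)) = [] := by
    rw [List.filter_eq_nil_iff]
    intro a ha
    simp only [PySem.Set.mem_ofList] at ha
    simp
    exact h a ha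
  rw [this, List.append_nil]

theorem foldl_update_flatMap (ys : List Int) (g : Int → List (Int × Int)) (s : PySem.Set (Int × Int)) :
    ys.foldl (fun s y => PySem.Set.update s (g y)) s = PySem.Set.update s (ys.flatMap g) := by
  induction ys generalizing s with
  | nil => simp [PySem.Set.update_nil]
  | cons y ys ih => simp [List.foldl_cons, ih, PySem.Set.update_append]

theorem update_tri (xs : List Int) (pre mid post : Int → List (Int × Int)) (s : PySem.Set (Int × Int))
    (hpre : ∀ x ∈ xs, ∀ p ∈ pre x, p ∈ s) (hpost : ∀ x ∈ xs, ∀ p ∈ post x, p ∈ s)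
    (hnd : ∀ x ∈ xs, (mid x).Nodup) (hfst : ∀ x ∈ xs, ∀ p ∈ mid x, p.1 = x)
    (hxs : xs.Nodup) (hfresh : ∀ x ∈ xs, ∀ p ∈ mid x, p ∉ s) :
    PySem.Set.update s (xs.flatMap (fun x => pre x ++ mid x ++ post x)) = s ++ xs.flatMap mid := by
  induction xs generalizing s with
  | nil => simp [PySem.Set.update_nil]
  | cons x xs ih =>
    simp only [List.flatMap_cons]
    rw [PySem.Set.update_append, PySem.Set.update_append, PySem.Set.update_append]
    rw [upd_sub s (pre x) (hpre x (by simp))]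
    rw [PySem.Set.update_eq_append_of_disjoint _ _ (hnd x (by simp)) (hfresh x (by simp))]
    rw [upd_sub _ (post x) (fun p hp => List.mem_append_left _ (hpost x (by simp) p hp))]
    have hfresh' : ∀ x' ∈ xs, ∀ p ∈ mid x', p ∉ s ++ mid x := by
      intro x' hx' p hp hmem
      rcases List.mem_append.mp hmem with h1 | h1
      · exact hfresh x' (List.mem_cons_of_mem _ hx') p hp h1
      · have e1 := hfst x (List.mem_cons_self) p h1
        have e2 := hfst x' (List.mem_cons_of_mem _ hx') p hp
        rcases List.nodup_cons.mp hxs with ⟨hnx, _⟩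
        exact hnx (by rw [← e1, e2]; exact hx')
    rw [ih (s ++ mid x)
          (fun x' hx' p hp => List.mem_append_left _ (hpre x' (List.mem_cons_of_mem _ hx') p hp))
          (fun x' hx' p hp => List.mem_append_left _ (hpost x' (List.mem_cons_of_mem _ hx') p hp))
          (fun x' hx' => hnd x' (List.mem_cons_of_mem _ hx'))
          (fun x' hx' => hfst x' (List.mem_cons_of_mem _ hx'))
          hxs.of_cons hfresh']
    simp

theorem A_eq_updates (w h b : Int) : edge_coordinates w h b =
    PySem.Set.update (PySem.Set.update (PySem.Set.update (PySem.Set.update PySem.Set.empty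
      ((PySem.List.pyRange 0 (min b h) 1).flatMap (pvRow w)))
      ((PySem.List.pyRange (max 0 (h - b)) h 1).flatMap (pvRow w)))
      ((PySem.List.pyRange 0 (min b w) 1).flatMap (pvColSeg 0 h)))
      ((PySem.List.pyRange (max 0 (w - b)) w 1).flatMap (pvColSeg 0 h)) := by
  simp only [edge_coordinates, ← PySem.Set.update_map_eq_foldl_add, foldl_update_flatMap]
  rfl

theorem mem_pvColSeg (t bo x : Int) (p : Int × Int) :
    p ∈ pvColSeg t bo x ↔ p.1 = x ∧ t ≤ p.2 ∧ p.2 < bo := by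
  obtain ⟨px, py⟩ := p
  simp only [pvColSeg, List.mem_map, PySem.List.mem_pyRange_one, Prod.mk.injEq]
  constructor
  · rintro ⟨y, hy, rfl, rfl⟩; exact ⟨rfl, hy.1, hy.2⟩
  · rintro ⟨rfl, h3, h4⟩; exact ⟨py, ⟨h3, h4⟩, rfl, rfl⟩

theorem pvRow_nil (w y : Int) (hw : w ≤ 0) : pvRow w y = [] := by
  simp [pvRow, PySem.List.pyRange_one_eq_nil hw]

theorem pvColSeg_nil (t bo x : Int) (hb : bo ≤ t) : pvColSeg t bo x = [] := by
  simp [pvColSeg, PySem.List.pyRange_one_eq_nil hb]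

theorem nodup_pvColSeg (t bo x : Int) : (pvColSeg t bo x).Nodup :=
  (PySem.List.nodup_pyRange_one _ _).map (fun a b hab => by simpa using congrArg Prod.snd hab)

theorem B_eq (w h b : Int) : edge_coordinates_alt w h b =
    PySem.Set.ofList
      (((PySem.List.pyRange 0 (min b h) 1).flatMap (pvRow w) ++
        (PySem.List.pyRange (max (min b h) (h - b)) h 1).flatMap (pvRow w)) ++
       ((PySem.List.pyRange 0 (min b w) 1).flatMap (pvColSeg (min b h) (max (min b h) (h - b))) ++
        (PySem.List.pyRange (max (min b w) (w - b)) w 1).flatMap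
          (pvColSeg (min b h) (max (min b h) (h - b))))) := by
  simp only [edge_coordinates_alt, List.flatMap_append]
  rfl

theorem main_eq (w h b : Int) : edge_coordinates w h b = edge_coordinates_alt w h b := by
  rcases le_or_gt b 0 with hb | hb
  · -- band ≤ 0: every stripe is empty on both sides
    have hA : edge_coordinates w h b = [] := by
      rw [A_eq_updates,
        PySem.List.pyRange_one_eq_nil (show min b h ≤ 0 by omega),
        PySem.List.pyRange_one_eq_nil (show h ≤ max 0 (h - b) by omega),
        PySem.List.pyRange_one_eq_nil (show min b w ≤ 0 by omega),
        PySem.List.pyRange_one_eq_nil (show w ≤ max 0 (w - b) by omega)]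
      simp [PySem.Set.update_nil]
    have hB : edge_coordinates_alt w h b = [] := by
      rw [B_eq,
        PySem.List.pyRange_one_eq_nil (show min b h ≤ 0 by omega),
        PySem.List.pyRange_one_eq_nil (show h ≤ max (min b h) (h - b) by omega),
        PySem.List.pyRange_one_eq_nil (show min b w ≤ 0 by omega),
        PySem.List.pyRange_one_eq_nil (show w ≤ max (min b w) (w - b) by omega)]
      rfl
    rw [hA, hB]
  rcases le_or_gt h 0 with hh | hh
  · -- height ≤ 0 (band ≥ 1)
    have hcol : ∀ l : List Int, l.flatMap (pvColSeg 0 h) = [] :=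
      fun l => List.flatMap_eq_nil_iff.mpr (fun x _ => pvColSeg_nil 0 h x hh)
    have hA : edge_coordinates w h b = [] := by
      rw [A_eq_updates,
        PySem.List.pyRange_one_eq_nil (show min b h ≤ 0 by omega),
        PySem.List.pyRange_one_eq_nil (show h ≤ max 0 (h - b) by omega),
        hcol, hcol]
      simp [PySem.Set.update_nil]
    have hB : edge_coordinates_alt w h b = [] := by
      have hcol' : ∀ l : List Int,
          l.flatMap (pvColSeg (min b h) (max (min b h) (h - b))) = [] :=
        fun l => List.flatMap_eq_nil_iff.mpr
          (fun x _ => pvColSeg_nil _ _ x (by omega))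
      rw [B_eq,
        PySem.List.pyRange_one_eq_nil (show min b h ≤ 0 by omega),
        PySem.List.pyRange_one_eq_nil (show h ≤ max (min b h) (h - b) by omega),
        hcol', hcol']
      rfl
    rw [hA, hB]
  rcases le_or_gt w 0 with hw | hw
  · -- width ≤ 0 (band ≥ 1, height ≥ 1)
    have hrow : ∀ l : List Int, l.flatMap (pvRow w) = [] :=
      fun l => List.flatMap_eq_nil_iff.mpr (fun y _ => pvRow_nil w y hw)
    have hA : edge_coordinates w h b = [] := by
      rw [A_eq_updates, hrow, hrow,
        PySem.List.pyRange_one_eq_nil (show min b w ≤ 0 by omega),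
        PySem.List.pyRange_one_eq_nil (show w ≤ max 0 (w - b) by omega)]
      simp [PySem.Set.update_nil]
    have hB : edge_coordinates_alt w h b = [] := by
      rw [B_eq, hrow, hrow,
        PySem.List.pyRange_one_eq_nil (show min b w ≤ 0 by omega),
        PySem.List.pyRange_one_eq_nil (show w ≤ max (min b w) (w - b) by omega)]
      rfl
    rw [hA, hB]
  -- main case: 0 < b, 0 < h, 0 < w
  have hcolsplit : pvColSeg 0 h = fun x =>
      pvColSeg 0 (min b h) x ++ pvColSeg (min b h) (max (min b h) (h - b)) x ++
      pvColSeg (max (min b h) (h - b)) h x := by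
    funext x
    simp only [pvColSeg]
    rw [PySem.List.pyRange_one_append 0 (max (min b h) (h - b)) h (by omega) (by omega),
      PySem.List.pyRange_one_append 0 (min b h) (max (min b h) (h - b)) (by omega) (by omega),
      List.map_append, List.map_append]
  -- step 1: the top band goes into the empty set unchanged
  have e1 : PySem.Set.update PySem.Set.empty ((PySem.List.pyRange 0 (min b h) 1).flatMap (pvRow w)) = ((PySem.List.pyRange 0 (min b h) 1).flatMap (pvRow w)) := by
    rw [PySem.Set.update_empty, PySem.Set.ofList_eq_self_of_nodup _ (nodup_flat_row 0 (min b h) w)]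
  -- step 2a: bottom rows already covered by the top band are dropped
  have e2a : PySem.Set.update ((PySem.List.pyRange 0 (min b h) 1).flatMap (pvRow w)) ((PySem.List.pyRange (max 0 (h - b)) (max (min b h) (h - b)) 1).flatMap (pvRow w)) = ((PySem.List.pyRange 0 (min b h) 1).flatMap (pvRow w)) := by
    refine upd_sub _ _ ?_
    intro p hp
    rw [mem_flat_row] at hp ⊢
    omega
  -- step 2b: the fresh bottom rows are appended
  have e2b : PySem.Set.update ((PySem.List.pyRange 0 (min b h) 1).flatMap (pvRow w)) ((PySem.List.pyRange (max (min b h) (h - b)) h 1).flatMap (pvRow w)) = ((PySem.List.pyRange 0 (min b h) 1).flatMap (pvRow w)) ++ ((PySem.List.pyRange (max (min b h) (h - b)) h 1).flatMap (pvRow w)) := by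
    refine PySem.Set.update_eq_append_of_disjoint _ _ (nodup_flat_row _ _ _) ?_
    intro p hp hq
    rw [mem_flat_row] at hp hq
    omega
  -- step 3: left columns: top/bottom parts are already present, middles are appended
  have e3 : PySem.Set.update (((PySem.List.pyRange 0 (min b h) 1).flatMap (pvRow w)) ++ ((PySem.List.pyRange (max (min b h) (h - b)) h 1).flatMap (pvRow w)))
      ((PySem.List.pyRange 0 (min b w) 1).flatMap (fun x =>
        pvColSeg 0 (min b h) x ++ pvColSeg (min b h) (max (min b h) (h - b)) x ++
        pvColSeg (max (min b h) (h - b)) h x)) = (((PySem.List.pyRange 0 (min b h) 1).flatMap (pvRow w)) ++ ((PySem.List.pyRange (max (min b h) (h - b)) h 1).flatMap (pvRow w))) ++ ((PySem.List.pyRange 0 (min b w) 1).flatMap (pvColSeg (min b h) (max (min b h) (h - b)))) := by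
    refine update_tri _ _ _ _ _ ?_ ?_ (fun x _ => nodup_pvColSeg _ _ _)
      (fun x _ p hp => ((mem_pvColSeg _ _ _ _).mp hp).1) (PySem.List.nodup_pyRange_one _ _) ?_
    · intro x hx p hp
      rw [PySem.List.mem_pyRange_one] at hx
      rw [mem_pvColSeg] at hp
      rw [List.mem_append, mem_flat_row, mem_flat_row]
      omega
    · intro x hx p hp
      rw [PySem.List.mem_pyRange_one] at hx
      rw [mem_pvColSeg] at hp
      rw [List.mem_append, mem_flat_row, mem_flat_row]
      omega
    · intro x hx p hp hq
      rw [PySem.List.mem_pyRange_one] at hx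
      rw [mem_pvColSeg] at hp
      rw [List.mem_append, mem_flat_row, mem_flat_row] at hq
      omega
  -- step 4a: right columns already inside the left band are dropped
  have e4a : PySem.Set.update ((((PySem.List.pyRange 0 (min b h) 1).flatMap (pvRow w)) ++ ((PySem.List.pyRange (max (min b h) (h - b)) h 1).flatMap (pvRow w))) ++ ((PySem.List.pyRange 0 (min b w) 1).flatMap (pvColSeg (min b h) (max (min b h) (h - b)))))
      ((PySem.List.pyRange (max 0 (w - b)) (max (min b w) (w - b)) 1).flatMap (fun x =>
        pvColSeg 0 (min b h) x ++ pvColSeg (min b h) (max (min b h) (h - b)) x ++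
        pvColSeg (max (min b h) (h - b)) h x)) = (((PySem.List.pyRange 0 (min b h) 1).flatMap (pvRow w)) ++ ((PySem.List.pyRange (max (min b h) (h - b)) h 1).flatMap (pvRow w))) ++ ((PySem.List.pyRange 0 (min b w) 1).flatMap (pvColSeg (min b h) (max (min b h) (h - b)))) := by
    refine upd_sub _ _ ?_
    intro p hp
    rw [List.mem_flatMap] at hp
    obtain ⟨x, hx, hp⟩ := hp
    rw [PySem.List.mem_pyRange_one] at hx
    rw [List.mem_append, List.mem_append, mem_pvColSeg, mem_pvColSeg, mem_pvColSeg] at hp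
    rw [List.mem_append, List.mem_append, mem_flat_row, mem_flat_row, mem_flat_col]
    omega
  -- step 4b: fresh right columns: top/bottom parts present, middles appended
  have e4b : PySem.Set.update ((((PySem.List.pyRange 0 (min b h) 1).flatMap (pvRow w)) ++ ((PySem.List.pyRange (max (min b h) (h - b)) h 1).flatMap (pvRow w))) ++ ((PySem.List.pyRange 0 (min b w) 1).flatMap (pvColSeg (min b h) (max (min b h) (h - b)))))
      ((PySem.List.pyRange (max (min b w) (w - b)) w 1).flatMap (fun x =>
        pvColSeg 0 (min b h) x ++ pvColSeg (min b h) (max (min b h) (h - b)) x ++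
        pvColSeg (max (min b h) (h - b)) h x)) = ((((PySem.List.pyRange 0 (min b h) 1).flatMap (pvRow w)) ++ ((PySem.List.pyRange (max (min b h) (h - b)) h 1).flatMap (pvRow w))) ++ ((PySem.List.pyRange 0 (min b w) 1).flatMap (pvColSeg (min b h) (max (min b h) (h - b))))) ++ ((PySem.List.pyRange (max (min b w) (w - b)) w 1).flatMap (pvColSeg (min b h) (max (min b h) (h - b)))) := by
    refine update_tri _ _ _ _ _ ?_ ?_ (fun x _ => nodup_pvColSeg _ _ _)
      (fun x _ p hp => ((mem_pvColSeg _ _ _ _).mp hp).1) (PySem.List.nodup_pyRange_one _ _) ?_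
    · intro x hx p hp
      rw [PySem.List.mem_pyRange_one] at hx
      rw [mem_pvColSeg] at hp
      rw [List.mem_append, List.mem_append, mem_flat_row, mem_flat_row, mem_flat_col]
      omega
    · intro x hx p hp
      rw [PySem.List.mem_pyRange_one] at hx
      rw [mem_pvColSeg] at hp
      rw [List.mem_append, List.mem_append, mem_flat_row, mem_flat_row, mem_flat_col]
      omega
    · intro x hx p hp hq
      rw [PySem.List.mem_pyRange_one] at hx
      rw [mem_pvColSeg] at hp
      rw [List.mem_append, List.mem_append, mem_flat_row, mem_flat_row, mem_flat_col] at hq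
      omega
  rw [A_eq_updates,
    PySem.List.pyRange_one_append (max 0 (h - b)) (max (min b h) (h - b)) h (by omega) (by omega),
    List.flatMap_append, PySem.Set.update_append,
    PySem.List.pyRange_one_append (max 0 (w - b)) (max (min b w) (w - b)) w (by omega) (by omega),
    List.flatMap_append, PySem.Set.update_append, hcolsplit,
    e1, e2a, e2b, e3, e4a, e4b]
  -- B side: the concatenation is duplicate-free, so set() keeps it as is
  rw [B_eq, PySem.Set.ofList_eq_self_of_nodup _ (by
    refine List.Nodup.append (List.Nodup.append ?_ ?_ ?_) (List.Nodup.append ?_ ?_ ?_) ?_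
    · exact nodup_flat_row _ _ _
    · exact nodup_flat_row _ _ _
    · intro p hp hq
      rw [mem_flat_row] at hp hq
      omega
    · exact nodup_flat_col _ _ _ _
    · exact nodup_flat_col _ _ _ _
    · intro p hp hq
      rw [mem_flat_col] at hp hq
      omega
    · intro p hp hq
      rw [List.mem_append, mem_flat_row, mem_flat_row] at hp
      rw [List.mem_append, mem_flat_col, mem_flat_col] at hq
      omega)]
  simp [List.append_assoc]

-- ===== VERDICT (by name: the statement is the Claim_ definition above) =====
theorem edge_coordinates_spec : Claim_equal_edge_coordinates := by
  intro w h b _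
  unfold Spec_edge_coordinates
  exact main_eq w h b
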